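-- pv_equiv track=rewrite | github.com/Lvgr1947/cp_problems | 10-mostfrequencydigit-Python/mostfrequentdigit.py | mostfrequentdigit
-- ===== SOURCE A (Python) =====
-- def mostfrequentdigit(n):
-- 		# your code goes here
-- 	p=[]
-- 	dicts = {}
-- 	n = str(n)
-- 	for i in n:
-- 		if i in dicts:
-- 			dicts[i] +=1
-- 		else:
-- 			dicts[i] = 0
--
-- 	a = max(dicts.values())
-- 	for j in dicts.keys():
-- 		if dicts[j] == a:
-- 			p.append(int(j))
-- 	return min(p)
-- ===== SOURCE B (Python) =====
-- def mostfrequentdigit(n):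
--     s = sorted(str(n))
--     run = None
--     run_len = 0
--     best = None
--     best_len = 0
--     for c in s:
--         if c == run:
--             run_len += 1
--         else:
--             run = c
--             run_len = 1
--         if run_len > best_len:
--             best = run
--             best_len = run_len
--     return int(best)
-- ===== Notes on version B (the rewrite author's own statement) =====
-- stated objective: alternative
-- what changed: A builds a character-count dict over str(n), takes the max of its values, filters the max-count characters into a list and returns its min; B sorts the characters of str(n) and does a single run-length scan over the sorted list, keeping the first (hence smallest) run of strictly greatest length and converting only that one character.
import Mathlib
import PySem

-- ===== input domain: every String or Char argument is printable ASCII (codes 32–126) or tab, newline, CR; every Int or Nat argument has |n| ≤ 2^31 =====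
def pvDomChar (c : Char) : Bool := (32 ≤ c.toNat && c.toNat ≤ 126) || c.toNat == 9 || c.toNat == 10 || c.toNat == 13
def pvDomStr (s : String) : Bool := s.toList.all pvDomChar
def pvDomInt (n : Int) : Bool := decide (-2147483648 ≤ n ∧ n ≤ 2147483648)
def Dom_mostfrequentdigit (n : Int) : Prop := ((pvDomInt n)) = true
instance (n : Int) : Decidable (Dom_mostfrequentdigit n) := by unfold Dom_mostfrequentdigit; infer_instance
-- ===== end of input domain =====

-- B replaces A's counting dict and two selection passes by sorting the characters of str(n)
-- and a single run-length scan over the sorted list (objective: alternative). Return value only.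

-- ===== PORT A =====
def mostfrequentdigit (n : Int) : Int :=
  let s := PySem.Int.toChars n
  let dicts := s.foldl (fun d i =>
      if d.contains i then d.modify i 0 (· + 1) else d.insert i 0)
    (PySem.Dict.empty : PySem.Dict Char Int)
  let a := (PySem.List.max? dicts.values (fun v => v)).getD 0
  let p := dicts.keys.foldl (fun p j =>
      if dicts.getD j 0 == a then p ++ [(PySem.Int.ofChars? [j]).getD 0] else p) ([] : List Int)
  (PySem.List.min? p (fun v => v)).getD 0

-- ===== PORT B =====
-- the loop body of Source B: state (run, run_len, best, best_len)
def mfdStep (st : Option Char × Int × Option Char × Int) (c : Char) :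
    Option Char × Int × Option Char × Int :=
  let rr := if some c == st.1 then (st.1, st.2.1 + 1) else (some c, (1 : Int))
  if rr.2 > st.2.2.2 then (rr.1, rr.2, rr.1, rr.2) else (rr.1, rr.2, st.2.2.1, st.2.2.2)

def mostfrequentdigit_alt (n : Int) : Int :=
  let s := PySem.List.sorted (PySem.Int.toChars n) (fun c => c) false
  let st := s.foldl mfdStep ((none, 0, none, 0) : Option Char × Int × Option Char × Int)
  match st.2.2.1 with          -- int(best); best is never None since str(n) is nonempty
  | some b => (PySem.Int.ofChars? [b]).getD 0
  | none => 0

-- ===== PRECONDITION & SPEC =====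
-- Pre_ excludes exactly the inputs where A raises ValueError (int('-')): negative n whose
-- decimal digits are pairwise distinct, so that every character of str(n) — including '-' —
-- occurs exactly once and '-' reaches int().  B raises there too.
def Pre_mostfrequentdigit (n : Int) : Prop := 0 ≤ n ∨ ¬ (PySem.Int.toChars n).Nodup
instance (n : Int) : Decidable (Pre_mostfrequentdigit n) := by unfold Pre_mostfrequentdigit; infer_instance
def pvWitness_mostfrequentdigit : Int := 0

def Spec_mostfrequentdigit (n : Int) (out : Int) : Prop := out = mostfrequentdigit_alt n
instance (n : Int) (out : Int) : Decidable (Spec_mostfrequentdigit n out) := by unfold Spec_mostfrequentdigit; infer_instance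

-- ===== CLAIM (what is proved, stated in full; the proofs are below) =====
def Claim_equal_mostfrequentdigit : Prop := ∀ (n : Int), Dom_mostfrequentdigit n → Pre_mostfrequentdigit n → Spec_mostfrequentdigit n (mostfrequentdigit n)

-- ===== LEMMAS AND PROOFS =====

-- str(n) facts ------------------------------------------------------------

theorem toDigitsCore_ne_nil (b : Nat) : ∀ (fuel n : Nat) (ds : List Char), ds ≠ [] →
    Nat.toDigitsCore b fuel n ds ≠ [] := by
  intro fuel
  induction fuel with
  | zero => intro n ds h; simpa [Nat.toDigitsCore] using h
  | succ f ih =>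
    intro n ds h
    rw [Nat.toDigitsCore]
    split
    · simp
    · exact ih _ _ (by simp)

theorem toDigits_ne_nil (b n : Nat) : Nat.toDigits b n ≠ [] := by
  rw [Nat.toDigits, Nat.toDigitsCore]
  split
  · simp
  · exact toDigitsCore_ne_nil b _ _ _ (by simp)

theorem digitChar_isDigit (n : Nat) (h : n < 10) : (Nat.digitChar n).isDigit := by
  interval_cases n <;> decide

theorem toDigitsCore_isDigit : ∀ (fuel n : Nat) (ds : List Char), (∀ c ∈ ds, c.isDigit) →
    ∀ c ∈ Nat.toDigitsCore 10 fuel n ds, c.isDigit := by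
  intro fuel
  induction fuel with
  | zero => intro n ds h; simpa [Nat.toDigitsCore] using h
  | succ f ih =>
    intro n ds h
    rw [Nat.toDigitsCore]
    have hd : (Nat.digitChar (n % 10)).isDigit := digitChar_isDigit _ (Nat.mod_lt _ (by norm_num))
    split
    · intro c hc
      rcases List.mem_cons.1 hc with rfl | hc
      · exact hd
      · exact h c hc
    · exact ih _ _ (by intro c hc; rcases List.mem_cons.1 hc with rfl | hc; exacts [hd, h c hc])

theorem toDigits_isDigit (n : Nat) : ∀ c ∈ Nat.toDigits 10 n, c.isDigit :=
  toDigitsCore_isDigit _ _ _ (by simp)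

theorem toChars_ne_nil (n : Int) : PySem.Int.toChars n ≠ [] := by
  rw [PySem.Int.toChars]
  split
  · simp
  · exact toDigits_ne_nil 10 _

theorem toChars_classify (n : Int) : ∀ c ∈ PySem.Int.toChars n, c = '-' ∨ c.isDigit := by
  rw [PySem.Int.toChars]
  split
  · intro c hc
    rcases List.mem_cons.1 hc with rfl | hc
    · exact Or.inl rfl
    · exact Or.inr (toDigits_isDigit _ c hc)
  · intro c hc
    exact Or.inr (toDigits_isDigit _ c hc)

theorem count_dash_toChars (n : Int) :
    (PySem.Int.toChars n).count '-' = if n < 0 then 1 else 0 := by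
  have hnd : ∀ m : Nat, (Nat.toDigits 10 m).count '-' = 0 := by
    intro m
    rw [List.count_eq_zero]
    intro hm
    have := toDigits_isDigit m '-' hm
    exact absurd this (by decide)
  rw [PySem.Int.toChars]
  split
  · simp [hnd]
  · exact hnd _

-- A's counting loop -------------------------------------------------------

theorem keysA : ∀ (l : List Char) (d : PySem.Dict Char Int),
    (l.foldl (fun d i => if d.contains i then d.modify i 0 (· + 1) else d.insert i 0) d).keys
      = PySem.Set.update d.keys l := by
  intro l
  induction l with
  | nil => intro d; simp [PySem.Set.update_nil]
  | cons x t ih =>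
    intro d
    rw [List.foldl_cons, PySem.Set.update_cons]
    by_cases h : d.contains x
    · rw [if_pos h, ih]
      congr 1
      rw [PySem.Dict.keys_modify, PySem.Dict.keys_insert_of_contains _ _ h,
        PySem.Set.add_of_mem]
      exact (PySem.Dict.contains_iff_mem_keys _ _).1 h
    · rw [if_neg h, ih]
      congr 1
      rw [PySem.Dict.keys_insert_of_not_contains _ _ (by simpa using h),
        PySem.Set.add_of_not_mem]
      intro hm
      exact h ((PySem.Dict.contains_iff_mem_keys _ _).2 hm)

theorem getDA (c : Char) : ∀ (l : List Char) (d : PySem.Dict Char Int),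
    (l.foldl (fun d i => if d.contains i then d.modify i 0 (· + 1) else d.insert i 0) d).getD c 0
      = d.getD c 0 + (l.count c : Int) - (if d.contains c = false ∧ c ∈ l then 1 else 0) := by
  intro l
  induction l with
  | nil => intro d; simp
  | cons x t ih =>
    intro d
    rw [List.foldl_cons]
    by_cases hx : d.contains x
    · rw [if_pos hx, ih, PySem.Dict.getD_modify, PySem.Dict.contains_modify]
      by_cases hcx : c = x
      · subst hcx
        have hc : d.contains c = true := hx
        simp [hc]
        ring
      · have hne : (x == c) = false := by simp [Ne.symm hcx]
        simp [hcx, List.count_cons, hne]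
    · rw [if_neg hx, ih, PySem.Dict.getD_insert, PySem.Dict.contains_insert]
      by_cases hcx : c = x
      · subst hcx
        have h0 : d.getD c 0 = 0 := PySem.Dict.getD_of_not_contains _ _ (by simpa using hx)
        simp [h0, hx]
      · have hne : (x == c) = false := by simp [Ne.symm hcx]
        simp [hcx, List.count_cons, hne]

-- B's run-length scan over the sorted list --------------------------------

-- Invariant after processing prefix p of the sorted list: run is the last (largest)
-- character with its full count, best is the least character of maximal count.
def MfdInv (p : List Char) (st : Option Char × Int × Option Char × Int) : Prop :=
  (p = [] ∧ st = (none, 0, none, 0)) ∨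
  (∃ l c, st = (some l, (p.count l : Int), some c, (p.count c : Int)) ∧
    l ∈ p ∧ (∀ x ∈ p, x ≤ l) ∧ c ∈ p ∧
    (∀ y ∈ p, p.count y ≤ p.count c) ∧ (∀ y ∈ p, p.count y = p.count c → c ≤ y))

theorem mfdStep_pres (p : List Char) (a : Char) (st : Option Char × Int × Option Char × Int)
    (h : MfdInv p st) (ha : ∀ x ∈ p, x ≤ a) : MfdInv (p ++ [a]) (mfdStep st a) := by
  rcases h with ⟨hp, hst⟩ | ⟨l, c0, hst, hl, hlub, hc0, hmax, hmin⟩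
  · subst hp hst
    refine Or.inr ⟨a, a, ?_, by simp, by simp, by simp, by simp, by simp⟩
    simp [mfdStep]
  · subst hst
    by_cases hal : a = l
    · subst hal
      have hcnt : (p ++ [a]).count a = p.count a + 1 := by simp
      have hcnt' : ∀ y, y ≠ a → (p ++ [a]).count y = p.count y := by
        intro y hy
        have hb : ¬ a = y := fun hh => hy hh.symm
        simp [List.count_append, hb]
      by_cases hgt : (p.count a : Int) + 1 > (p.count c0 : Int)
      · refine Or.inr ⟨a, a, ?_, by simp, ?_, by simp, ?_, ?_⟩
        · simp [mfdStep, hgt, hcnt]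
        · intro x hx
          rcases List.mem_append.1 hx with hx | hx
          · exact hlub x hx
          · simp at hx; exact le_of_eq hx
        · intro y hy
          by_cases hya : y = a
          · subst hya; exact le_refl _
          · rw [hcnt' y hya, hcnt]
            have hyp : y ∈ p := by
              rcases List.mem_append.1 hy with h | h
              · exact h
              · simp at h; exact absurd h hya
            have := hmax y hyp
            omega
        · intro y hy hcy
          by_cases hya : y = a
          · subst hya; exact le_refl _
          · exfalso
            rw [hcnt' y hya, hcnt] at hcy
            have hyp : y ∈ p := by
              rcases List.mem_append.1 hy with h | h
              · exact h
              · simp at h; exact absurd h hya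
            have h1 := hmax y hyp
            have h2 := hmax a hl
            omega
      · have hc0a : c0 ≠ a := by
          intro hh; subst hh; omega
        refine Or.inr ⟨a, c0, ?_, by simp, ?_, List.mem_append.2 (Or.inl hc0), ?_, ?_⟩
        · rw [hcnt' c0 hc0a]
          simp only [mfdStep, beq_self_eq_true, if_true, hcnt]
          push_cast
          simp [hgt]
        · intro x hx
          rcases List.mem_append.1 hx with hx | hx
          · exact hlub x hx
          · simp at hx; exact le_of_eq hx
        · intro y hy
          rw [hcnt' c0 hc0a]
          by_cases hya : y = a
          · subst hya; rw [hcnt]; omega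
          · rw [hcnt' y hya]
            have hyp : y ∈ p := by
              rcases List.mem_append.1 hy with h | h
              · exact h
              · simp at h; exact absurd h hya
            exact hmax y hyp
        · intro y hy hcy
          rw [hcnt' c0 hc0a] at hcy
          by_cases hya : y = a
          · subst hya; exact hlub c0 hc0
          · rw [hcnt' y hya] at hcy
            have hyp : y ∈ p := by
              rcases List.mem_append.1 hy with h | h
              · exact h
              · simp at h; exact absurd h hya
            exact hmin y hyp hcy
    · -- a ≠ l : a is strictly larger than everything in p, so a ∉ p
      have hanp : a ∉ p := by
        intro hap
        exact hal (le_antisymm (hlub a hap) (ha l hl))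
      have hcnta : (p ++ [a]).count a = 1 := by
        simp [List.count_append, List.count_eq_zero.2 hanp]
      have hcnt' : ∀ y, y ≠ a → (p ++ [a]).count y = p.count y := by
        intro y hy
        have hb : ¬ a = y := fun hh => hy hh.symm
        simp [List.count_append, hb]
      have hc0a : c0 ≠ a := fun hh => hanp (hh ▸ hc0)
      have hc0pos : 0 < p.count c0 := List.count_pos_iff.2 hc0
      have hngt : ¬ ((1 : Int) > (p.count c0 : Int)) := by omega
      have hbeq : (some a == some l) = false := by simp [hal]
      refine Or.inr ⟨a, c0, ?_, by simp, ?_, List.mem_append.2 (Or.inl hc0), ?_, ?_⟩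
      · simp [mfdStep, hbeq, hngt, hcnta, hcnt' c0 hc0a]
      · intro x hx
        rcases List.mem_append.1 hx with hx | hx
        · exact ha x hx
        · simp at hx; exact le_of_eq hx
      · intro y hy
        rw [hcnt' c0 hc0a]
        by_cases hya : y = a
        · subst hya; rw [hcnta]; omega
        · rw [hcnt' y hya]
          have hyp : y ∈ p := by
            rcases List.mem_append.1 hy with h | h
            · exact h
            · simp at h; exact absurd h hya
          exact hmax y hyp
      · intro y hy hcy
        rw [hcnt' c0 hc0a] at hcy
        by_cases hya : y = a
        · subst hya; exact ha c0 hc0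
        · rw [hcnt' y hya] at hcy
          have hyp : y ∈ p := by
            rcases List.mem_append.1 hy with h | h
            · exact h
            · simp at h; exact absurd h hya
          exact hmin y hyp hcy

theorem mfd_fold_inv : ∀ (rest p : List Char) (st : Option Char × Int × Option Char × Int),
    (p ++ rest).Pairwise (· ≤ ·) → MfdInv p st → MfdInv (p ++ rest) (rest.foldl mfdStep st) := by
  intro rest
  induction rest with
  | nil => intro p st _ h; simpa using h
  | cons a rest' ih =>
    intro p st hpw h
    have ha : ∀ x ∈ p, x ≤ a := by
      have := (List.pairwise_append.1 hpw).2.2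
      intro x hx
      exact this x hx a (List.mem_cons_self ..)
    have hstep := mfdStep_pres p a st h ha
    have hpw' : ((p ++ [a]) ++ rest').Pairwise (· ≤ ·) := by
      rw [List.append_assoc, List.singleton_append]; exact hpw
    have := ih (p ++ [a]) (mfdStep st a) hpw' hstep
    rw [List.append_assoc, List.singleton_append] at this
    simpa using this

-- int(c) for a digit character --------------------------------------------

theorem digit_mem (c : Char) (h : c.isDigit) :
    c ∈ ['0','1','2','3','4','5','6','7','8','9'] := by
  have hb : 48 ≤ c.toNat ∧ c.toNat ≤ 57 := by
    simp [Char.isDigit] at h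
    obtain ⟨h1, h2⟩ := h
    exact ⟨by simpa [UInt32.le_iff_toNat_le] using h1, by simpa [UInt32.le_iff_toNat_le] using h2⟩
  obtain ⟨h1, h2⟩ := hb
  have hc : c = Char.ofNat c.toNat := (Char.ofNat_toNat c).symm
  interval_cases hn : c.toNat <;> rw [hc] <;> decide

theorem ofChars_digit (c : Char) (h : c.isDigit) :
    PySem.Int.ofChars? [c] = some ((c.toNat : Int) - 48) := by
  have := digit_mem c h
  fin_cases this <;> decide

-- main equivalence ---------------------------------------------------------

theorem mfd_main (n : Int) (hpre : Pre_mostfrequentdigit n) :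
    mostfrequentdigit n = mostfrequentdigit_alt n := by
  have hSne := toChars_ne_nil n
  simp only [mostfrequentdigit, mostfrequentdigit_alt]
  set S := PySem.Int.toChars n with hS
  set T := PySem.List.sorted S (fun c => c) false with hT
  -- B's side: the invariant over the whole sorted list
  have hperm : T.Perm S := PySem.List.sorted_perm S (fun c => c) false
  have hTne : T ≠ [] := by
    intro hnil
    exact hSne (List.Perm.eq_nil (hnil ▸ hperm).symm)
  have hpw : T.Pairwise (· ≤ ·) := PySem.List.sorted_pairwise S (fun c => c)
  have hInv : MfdInv T (T.foldl mfdStep ((none, 0, none, 0))) := by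
    have := mfd_fold_inv T [] ((none, 0, none, 0)) (by simpa using hpw) (Or.inl ⟨rfl, rfl⟩)
    simpa using this
  rcases hInv with ⟨hnil, _⟩ | ⟨l, cB, hst, _, _, hcBT, hmaxT, hminT⟩
  · exact absurd hnil hTne
  -- transfer B's characterization to S
  have hcount : ∀ x, T.count x = S.count x := fun x => hperm.count_eq x
  have hcBmem : cB ∈ S := hperm.mem_iff.1 hcBT
  have hcBmax : ∀ y ∈ S, S.count y ≤ S.count cB := by
    intro y hy
    have := hmaxT y (hperm.mem_iff.2 hy)
    simpa [hcount] using this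
  have hcBmin : ∀ y ∈ S, S.count y = S.count cB → cB ≤ y := by
    intro y hy hc
    exact hminT y (hperm.mem_iff.2 hy) (by simpa [hcount] using hc)
  -- every max-count character is a digit (Pre_ rules '-' out of the max set)
  have hdigit : ∀ c ∈ S, S.count c = S.count cB → c.isDigit := by
    intro c hc hcount'
    rcases toChars_classify n c hc with rfl | hd
    · exfalso
      have hneg : n < 0 := by
        by_contra hnn
        have h0 : S.count '-' = 0 := by rw [hS, count_dash_toChars, if_neg hnn]
        have h1 := List.count_pos_iff.2 hc
        omega
      have hone : S.count '-' = 1 := by rw [hS, count_dash_toChars, if_pos hneg]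
      have hnodupS : ¬ S.Nodup := by
        rcases hpre with h | h
        · omega
        · exact h
      have h2 : ∃ x, 2 ≤ S.count x := by
        by_contra hno
        push Not at hno
        exact hnodupS (List.nodup_iff_count_le_one.2 (fun a => by have := hno a; omega))
      obtain ⟨x, hx2⟩ := h2
      have hxmem : x ∈ S := List.count_pos_iff.mp (by omega)
      have := hcBmax x hxmem
      omega
    · exact hd
  have hcBdigit : cB.isDigit := hdigit cB hcBmem rfl
  -- B's value
  have hBval : (match (T.foldl mfdStep ((none, 0, none, 0) : Option Char × Int × Option Char × Int)).2.2.1 with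
      | some b => (PySem.Int.ofChars? [b]).getD 0
      | none => (0 : Int)) = (cB.toNat : Int) - 48 := by
    rw [hst]
    simp [ofChars_digit cB hcBdigit]
  rw [hBval]
  -- A's side (as in the dict analysis)
  set D := S.foldl (fun d i => if d.contains i then d.modify i 0 (· + 1) else d.insert i 0)
    (PySem.Dict.empty : PySem.Dict Char Int) with hD
  have hkeys : D.keys = PySem.Set.ofList S := by
    rw [hD, keysA, PySem.Dict.keys_empty, PySem.Set.update_nil_left]
  have hnodup : D.keys.Nodup := by rw [hkeys]; exact PySem.Set.nodup_ofList S
  have hget : ∀ c ∈ S, D.getD c 0 = (S.count c : Int) - 1 := by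
    intro c hc
    rw [hD, getDA]
    simp [PySem.Dict.contains_empty, hc]
  have hvals : D.values = D.keys.map (fun k => D.getD k 0) := PySem.Dict.values_eq_map_keys D hnodup 0
  obtain ⟨a, hmax⟩ : ∃ a, PySem.List.max? D.values (fun v => v) = some a := by
    cases hm : PySem.List.max? D.values (fun v => v) with
    | none =>
      exfalso
      have hnil := (PySem.List.max?_eq_none_iff _ _).1 hm
      rw [hvals, List.map_eq_nil_iff, hkeys] at hnil
      cases hE : S with
      | nil => exact hSne hE
      | cons x t =>
        have hx : x ∈ PySem.Set.ofList S :=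
          (PySem.Set.mem_ofList _ _).2 (by rw [hE]; exact List.mem_cons_self ..)
        rw [hnil] at hx
        exact List.not_mem_nil hx
    | some a => exact ⟨a, rfl⟩
  have haval : a = (S.count cB : Int) - 1 := by
    have hamem := PySem.List.max?_mem hmax
    have hmaxle := PySem.List.max?_isMax hmax
    rw [hvals] at hamem
    obtain ⟨c0, hc0, hc0a⟩ := List.mem_map.1 hamem
    have hc0S : c0 ∈ S := (PySem.Set.mem_ofList _ _).1 (hkeys ▸ hc0)
    have h1 : a ≤ (S.count cB : Int) - 1 := by
      rw [← hc0a, hget c0 hc0S]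
      have := hcBmax c0 hc0S
      omega
    have h2 : (S.count cB : Int) - 1 ≤ a := by
      have hmem2 : (S.count cB : Int) - 1 ∈ D.values := by
        rw [hvals]
        exact List.mem_map.2 ⟨cB, hkeys ▸ (PySem.Set.mem_ofList _ _).2 hcBmem, hget cB hcBmem⟩
      simpa using hmaxle _ hmem2
    omega
  have hA : (PySem.List.max? D.values (fun v => v)).getD 0 = a := by rw [hmax]; rfl
  rw [PySem.List.foldl_append_if]
  simp only [List.nil_append]
  have hFmem : ∀ c, c ∈ D.keys.filter (fun j => D.getD j 0 == (PySem.List.max? D.values (fun v => v)).getD 0) ↔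
      (c ∈ S ∧ S.count c = S.count cB) := by
    intro c
    rw [List.mem_filter, hkeys, PySem.Set.mem_ofList]
    constructor
    · rintro ⟨hcS, hceq⟩
      refine ⟨hcS, ?_⟩
      rw [hA, hget c hcS, haval] at hceq
      have := beq_iff_eq.1 hceq
      omega
    · rintro ⟨hcS, hceq⟩
      refine ⟨hcS, ?_⟩
      rw [hA, hget c hcS, haval]
      exact beq_iff_eq.2 (by omega)
  have hcBF : cB ∈ D.keys.filter (fun j => D.getD j 0 == (PySem.List.max? D.values (fun v => v)).getD 0) := (hFmem cB).2 ⟨hcBmem, rfl⟩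
  obtain ⟨r, hmin⟩ : ∃ r, PySem.List.min?
      ((D.keys.filter (fun j => D.getD j 0 == (PySem.List.max? D.values (fun v => v)).getD 0)).map (fun j => (PySem.Int.ofChars? [j]).getD 0))
      (fun v => v) = some r := by
    cases hm : PySem.List.min?
        ((D.keys.filter (fun j => D.getD j 0 == (PySem.List.max? D.values (fun v => v)).getD 0)).map (fun j => (PySem.Int.ofChars? [j]).getD 0))
        (fun v => v) with
    | none =>
      exfalso
      have hnil := (PySem.List.min?_eq_none_iff _ _).1 hm
      rw [List.map_eq_nil_iff] at hnil
      rw [hnil] at hcBF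
      exact List.not_mem_nil hcBF
    | some r => exact ⟨r, rfl⟩
  rw [hmin]
  simp only [Option.getD_some]
  have hrmem := PySem.List.min?_mem hmin
  have hrmin := PySem.List.min?_isMin hmin
  obtain ⟨c1, hc1F, hc1r⟩ := List.mem_map.1 hrmem
  obtain ⟨hc1S, hc1count⟩ := (hFmem c1).1 hc1F
  have hc1digit : c1.isDigit := hdigit c1 hc1S hc1count
  have hfcB : (PySem.Int.ofChars? [cB]).getD 0 = (cB.toNat : Int) - 48 := by
    rw [ofChars_digit cB hcBdigit]; rfl
  have hfc1 : (PySem.Int.ofChars? [c1]).getD 0 = (c1.toNat : Int) - 48 := by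
    rw [ofChars_digit c1 hc1digit]; rfl
  have hle1 : r ≤ (PySem.Int.ofChars? [cB]).getD 0 :=
    hrmin _ (List.mem_map.2 ⟨cB, hcBF, rfl⟩)
  have hcBc1 : cB ≤ c1 := hcBmin c1 hc1S hc1count
  have htoNat : cB.toNat ≤ c1.toNat := by
    simpa [Char.le_def, UInt32.le_iff_toNat_le] using hcBc1
  have hle2 : (PySem.Int.ofChars? [cB]).getD 0 ≤ r := by
    rw [← hc1r, hfcB, hfc1]
    omega
  have : r = (PySem.Int.ofChars? [cB]).getD 0 := le_antisymm hle1 hle2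
  rw [this, hfcB]

-- ===== VERDICT (by name: the statement is the Claim_ definition above) =====
theorem mostfrequentdigit_spec : Claim_equal_mostfrequentdigit := by
  intro n _ hpre
  unfold Spec_mostfrequentdigit
  exact mfd_main n hpre
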